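-- pv_equiv track=rewrite | github.com/camrobjones/pipr | scripts/stims_to_json.py | create_lists
-- ===== SOURCE A (Python) =====
-- def create_lists(stimuli):
--     """Create lists counterbalanced across conditions
--     """
--     # Get no of unique versions
--     n_lists = len(stimuli[0])
--
--     # Initialize list of lists
--     lists = []
--
--     for list_index in range(n_lists):
--
--         # Initialize version index as list_index
--         version_index = list_index
--         current_list = []
--
--         for item in stimuli:
--
--             current_list.append(item[version_index])
--
--             # Increment index by 1 mod n_lists
--             version_index = (version_index + 1) % n_lists
--
--         lists.append(current_list)
--
--     return lists
-- ===== SOURCE B (Python) =====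
-- def create_lists(stimuli):
--     """Create lists counterbalanced across conditions (rotate rows, then transpose)."""
--     n_lists = len(stimuli[0])
--     # Rotate each stimulus row left by a wrapping shift, using slices
--     rotated = []
--     shift = 0
--     for item in stimuli:
--         rotated.append(item[shift:n_lists] + item[:shift])
--         shift += 1
--         if shift == n_lists:
--             shift = 0
--     # Column j of the rotated matrix is counterbalanced list j
--     return [list(col) for col in zip(*rotated)]
-- ===== Notes on version B (the rewrite author's own statement) =====
-- stated objective: alternative
-- what changed: A gathers each output list in turn by walking the stimuli with a running modular version counter; B instead rotates each stimulus row by a wrapping shift using slice concatenation and then transposes the rotated matrix with zip(*rows), so the output lists are just columns — no per-element indexing and no modular arithmetic.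
import Mathlib
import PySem

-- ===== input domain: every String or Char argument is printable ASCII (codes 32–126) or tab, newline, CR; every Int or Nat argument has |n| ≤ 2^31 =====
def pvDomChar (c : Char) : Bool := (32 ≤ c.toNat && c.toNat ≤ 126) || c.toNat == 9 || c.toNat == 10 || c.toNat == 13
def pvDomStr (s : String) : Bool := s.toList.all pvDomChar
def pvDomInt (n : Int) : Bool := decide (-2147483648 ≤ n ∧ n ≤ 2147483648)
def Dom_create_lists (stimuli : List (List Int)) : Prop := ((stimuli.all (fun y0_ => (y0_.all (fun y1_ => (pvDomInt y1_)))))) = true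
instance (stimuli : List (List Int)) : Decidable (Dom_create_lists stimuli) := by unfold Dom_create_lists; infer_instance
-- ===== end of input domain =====

-- B replaces A's per-list gather with a running modular version counter by a rotate-and-transpose
-- algorithm: each stimulus row is rotated by slicing and the result is transposed with zip(*rows)
-- (an alternative decomposition, same cost; return values proved equal on Pre_).

-- ===== PORT A =====
-- inner-loop body of A: state = (version_index, current_list); version_index is nonnegative and
-- n_lists > 0 whenever the loop body runs, so Nat arithmetic equals Python's; item[version_index]
-- is in range under Pre_, so pyGetD's default 0 is unreached on admitted inputs.
def aStep (n_lists : Nat) (st : Nat × List Int) (item : List Int) : Nat × List Int :=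
  ((st.1 + 1) % n_lists, st.2 ++ [PySem.List.pyGetD item (st.1 : Int) 0])

def create_lists (stimuli : List (List Int)) : List (List Int) :=
  -- n_lists = len(stimuli[0]); raises IndexError on empty stimuli — excluded by Pre_, default unreached
  let n_lists : Nat := (PySem.List.pyGetD stimuli 0 ([] : List Int)).length
  (List.range n_lists).foldl
    (fun lists list_index => lists ++ [(stimuli.foldl (aStep n_lists) (list_index, ([] : List Int))).2])
    []

-- ===== PORT B =====
-- one step of B's rotation loop: state = (rotated, shift); shift is a Python int that stays ≥ 0,
-- ported as Nat; item[shift:n] and item[:shift] are PySem slices.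
def rotStep (n : Nat) (st : List (List Int) × Nat) (item : List Int) : List (List Int) × Nat :=
  (st.1 ++ [PySem.List.slice item (some (st.2 : Int)) (some (n : Int)) ++
            PySem.List.slice item none (some (st.2 : Int))],
   if st.2 + 1 == n then 0 else st.2 + 1)

-- zip(*rows): columns until some row is exhausted; fuel = length of the first row bounds the
-- number of columns (zip of no rows, or with an exhausted row, yields nothing) — exact for zip.
def zipStarGo : Nat → List (List Int) → List (List Int)
  | 0, _ => []
  | k + 1, rows =>
    if rows.all (fun r => !r.isEmpty)
    then rows.map (fun r => r.headD 0) :: zipStarGo k (rows.map List.tail)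
    else []

def zipStar (rows : List (List Int)) : List (List Int) :=
  match rows with
  | [] => []
  | r :: rs => zipStarGo r.length (r :: rs)

def create_lists_alt (stimuli : List (List Int)) : List (List Int) :=
  let n : Nat := (PySem.List.pyGetD stimuli 0 ([] : List Int)).length
  zipStar (stimuli.foldl (rotStep n) (([] : List (List Int)), 0)).1

-- ===== PRECONDITION & SPEC =====
-- Pre_ is exactly where the Python A returns: A raises IndexError on empty stimuli and whenever
-- some item is shorter than len(stimuli[0]) (item[version_index] eventually hits every index
-- 0..n_lists-1 of every item).
def Pre_create_lists (stimuli : List (List Int)) : Prop :=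
  stimuli ≠ [] ∧ ∀ item ∈ stimuli, stimuli.head!.length ≤ item.length
instance (stimuli : List (List Int)) : Decidable (Pre_create_lists stimuli) := by
  unfold Pre_create_lists; infer_instance
def pvWitness_create_lists : List (List Int) := [[1, 2], [3, 4]]

def Spec_create_lists (stimuli : List (List Int)) (out : List (List Int)) : Prop := out = create_lists_alt stimuli
instance (stimuli : List (List Int)) (out : List (List Int)) : Decidable (Spec_create_lists stimuli out) := by unfold Spec_create_lists; infer_instance

-- ===== CLAIM =====
def Claim_equal_create_lists : Prop := ∀ (stimuli : List (List Int)), Dom_create_lists stimuli → Pre_create_lists stimuli → Spec_create_lists stimuli (create_lists stimuli)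

-- ===== LEMMAS AND PROOFS =====

-- A's inner loop, written as the list it appends (same counter update).
def gatherA (n : Nat) : Nat → List (List Int) → List Int
  | _, [] => []
  | v, item :: rest => PySem.List.pyGetD item (v : Int) 0 :: gatherA n ((v + 1) % n) rest

theorem A_inner (n : Nat) : ∀ (stimuli : List (List Int)) (v : Nat) (acc : List Int),
    (stimuli.foldl (aStep n) (v, acc)).2 = acc ++ gatherA n v stimuli := by
  intro stimuli
  induction stimuli with
  | nil => intro v acc; simp [gatherA]
  | cons x xs ih => intro v acc; simp [List.foldl_cons, aStep, ih, gatherA]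

-- B's rotation loop, written as the rows it builds (same shift update).
def rowsFrom (n : Nat) : Nat → List (List Int) → List (List Int)
  | _, [] => []
  | s, item :: rest =>
      ((item.drop s).take (n - s) ++ item.take s) ::
        rowsFrom n (if s + 1 = n then 0 else s + 1) rest

theorem B_rows (n : Nat) : ∀ (stimuli : List (List Int)) (s : Nat) (acc : List (List Int)),
    (stimuli.foldl (rotStep n) (acc, s)).1 = acc ++ rowsFrom n s stimuli := by
  intro stimuli
  induction stimuli with
  | nil => intro s acc; simp [rowsFrom]
  | cons x xs ih =>
    intro s acc
    simp [List.foldl_cons, rotStep, ih, rowsFrom, PySem.List.slice_natCast,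
      PySem.List.slice_to_natCast]

-- the rotated row read at column j is the original item read at (j + s) % n
theorem rot_getD (n s j : Nat) (item : List Int) (hs : s < n) (hj : j < n)
    (hlen : n ≤ item.length) :
    ((item.drop s).take (n - s) ++ item.take s).getD j 0 = item.getD ((j + s) % n) 0 := by
  have hlen1 : ((item.drop s).take (n - s)).length = n - s := by
    simp only [List.length_take, List.length_drop]; omega
  by_cases h : j < n - s
  · have h1 : (j + s) % n = j + s := Nat.mod_eq_of_lt (by omega)
    rw [h1]
    simp only [List.getD_eq_getElem?_getD]
    rw [List.getElem?_append_left (by omega)]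
    rw [List.getElem?_take_of_lt h, List.getElem?_drop]
    congr 2
    omega
  · simp only [List.getD_eq_getElem?_getD]
    rw [List.getElem?_append_right (by rw [hlen1]; omega)]
    rw [hlen1]
    have h1 : (j + s) % n = j + s - n := by
      rw [Nat.mod_eq_sub_mod (by omega), Nat.mod_eq_of_lt (by omega)]
    rw [h1, List.getElem?_take_of_lt (by omega)]
    have h2 : j - (n - s) = j + s - n := by omega
    rw [h2]

-- columns of the rotated rows, as B's transpose will read them
theorem rows_col (n : Nat) : ∀ (stimuli : List (List Int)) (s j : Nat), s < n → j < n →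
    (∀ item ∈ stimuli, n ≤ item.length) →
    (rowsFrom n s stimuli).map (fun r => r.getD j 0) = gatherA n ((j + s) % n) stimuli := by
  intro stimuli
  induction stimuli with
  | nil => intro s j _ _ _; simp [rowsFrom, gatherA]
  | cons x xs ih =>
    intro s j hs hj hlen
    simp only [rowsFrom, List.map_cons, gatherA]
    congr 1
    · rw [rot_getD n s j x hs hj (hlen x (by simp))]
      rw [PySem.List.pyGetD_natCast]
    · by_cases h : s + 1 = n
      · rw [if_pos h, ih 0 j (by omega) hj (fun i hi => hlen i (by simp [hi]))]
        congr 1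
        rw [Nat.mod_add_mod, Nat.add_assoc]
        have h2 : j + (s + 1) = j + n := by omega
        rw [h2, Nat.add_mod_right]
        simp
      · rw [if_neg h, ih (s + 1) j (by omega) hj (fun i hi => hlen i (by simp [hi]))]
        congr 1
        rw [Nat.mod_add_mod, Nat.add_assoc]

-- zip(*rows) on rows that all have length k is the k columns
theorem zipStarGo_spec : ∀ (k : Nat) (rows : List (List Int)), rows ≠ [] →
    (∀ r ∈ rows, r.length = k) →
    zipStarGo k rows = (List.range k).map (fun j => rows.map (fun r => r.getD j 0)) := by
  intro k
  induction k with
  | zero => intro rows _ _; simp [zipStarGo]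
  | succ k ih =>
    intro rows hne hlen
    have hall : rows.all (fun r => !r.isEmpty) = true := by
      simp only [List.all_eq_true]
      intro r hr
      have := hlen r hr
      cases r with
      | nil => simp at this
      | cons a t => simp
    simp only [zipStarGo, if_pos hall]
    rw [ih (rows.map List.tail) (by simpa using hne)
      (by intro r hr; rcases List.mem_map.mp hr with ⟨t, ht, rfl⟩
          have := hlen t ht; simp [this])]
    rw [List.range_succ_eq_map, List.map_cons, List.map_map]
    congr 1
    · apply List.map_congr_left
      intro r hr
      have := hlen r hr
      cases r with
      | nil => simp at this
      | cons a t => simp [List.getD]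
    · apply List.map_congr_left
      intro j _
      simp only [Function.comp, List.map_map]
      apply List.map_congr_left
      intro r hr
      have := hlen r hr
      cases r with
      | nil => simp at this
      | cons a t => simp [List.getD]

theorem rowsFrom_length_eq (n : Nat) : ∀ (stimuli : List (List Int)) (s : Nat), s < n →
    (∀ item ∈ stimuli, n ≤ item.length) →
    ∀ r ∈ rowsFrom n s stimuli, r.length = n := by
  intro stimuli
  induction stimuli with
  | nil => intro s _ _ r hr; simp [rowsFrom] at hr
  | cons x xs ih =>
    intro s hs hlen r hr
    simp only [rowsFrom, List.mem_cons] at hr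
    rcases hr with rfl | hr
    · have hx : n ≤ x.length := hlen x (by simp)
      simp only [List.length_append, List.length_take, List.length_drop]
      omega
    · exact ih (if s + 1 = n then 0 else s + 1)
        (by split <;> omega)
        (fun i hi => hlen i (by simp [hi])) r hr

-- ===== VERDICT =====
theorem create_lists_spec : Claim_equal_create_lists := by
  intro stimuli _ hpre
  obtain ⟨hne, hlen⟩ := hpre
  unfold Spec_create_lists create_lists create_lists_alt
  cases stimuli with
  | nil => exact absurd rfl hne
  | cons first rest =>
    simp only [PySem.List.pyGetD_zero_cons]
    set n : Nat := first.length with hn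
    have hlen' : ∀ item ∈ first :: rest, n ≤ item.length := by
      intro item hi
      have := hlen item hi
      simpa [List.head!] using this
    rw [B_rows n (first :: rest) 0 []]
    simp only [List.nil_append]
    by_cases h0 : n = 0
    · simp only [h0, List.range_zero, List.foldl_nil]
      simp [rowsFrom, zipStar, zipStarGo]
    · have hpos : 0 < n := Nat.pos_of_ne_zero h0
      -- B side: transpose of the rotated rows
      have hr0 : rowsFrom n 0 (first :: rest) ≠ [] := by simp [rowsFrom]
      have hrl : ∀ r ∈ rowsFrom n 0 (first :: rest), r.length = n :=
        rowsFrom_length_eq n (first :: rest) 0 hpos hlen'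
      have hzs : zipStar (rowsFrom n 0 (first :: rest)) =
          (List.range n).map (fun j => (rowsFrom n 0 (first :: rest)).map (fun r => r.getD j 0)) := by
        cases hrow : rowsFrom n 0 (first :: rest) with
        | nil => exact absurd hrow hr0
        | cons r rs =>
          have hrlen : r.length = n := by
            apply hrl; rw [hrow]; simp
          have hz : zipStar (r :: rs) = zipStarGo r.length (r :: rs) := rfl
          rw [hz, hrlen]
          exact zipStarGo_spec n (r :: rs) (by simp) (by rw [← hrow]; exact hrl)
      rw [hzs]
      -- A side: map over range n of the gathered lists
      rw [PySem.List.foldl_append_singleton_eq_map]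
      apply List.map_congr_left
      intro j hj
      have hjn : j < n := List.mem_range.mp hj
      rw [A_inner n (first :: rest) j []]
      rw [rows_col n (first :: rest) 0 j hpos hjn hlen']
      simp [Nat.mod_eq_of_lt hjn]
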